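-- pv_equiv track=rewrite | github.com/shixuanliu-andy/SchemaWalk | datasets/data_preprocessing/preprocess_bio.py | filter_graph_with_type
-- ===== SOURCE A (Python) =====
-- from collections import defaultdict
--
-- def filter_graph_with_type(ins_graph, types, ins_ent_vocab):
--     ins_graph_new = []
--     sch_graph_new = []
--     relation_vocab_new = {"PAD": 0, "DUMMY_START_RELATION": 1,
--                           "NO_OP": 2, "UNK": 3}
--     relation2id = {}
--     rel_dict = defaultdict(list)
--     counter = 4
--     counter2 = 0
--     for rel, entries in ins_graph.items():
--         for e1, e2 in entries:
--             if e1 in types and e2 in types: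
--                 new_rel = "__".join([rel, types[e1], types[e2]])
--                 ins_graph_new.append([e1, new_rel, e2])
--                 if new_rel not in relation_vocab_new.keys():
--                     relation_vocab_new[new_rel] = counter
--                     relation2id[new_rel] = counter2
--                     counter += 1
--                     counter2 += 1
--                 rel_dict[relation_vocab_new[new_rel]].append([ins_ent_vocab[e1], ins_ent_vocab[e2]])
--                 new_list = [types[e1], new_rel, types[e2]]
--                 if new_list not in sch_graph_new:
--                     sch_graph_new.append(new_list)
--     return ins_graph_new, sch_graph_new, relation_vocab_new, dict(rel_dict), relation2id
-- ===== SOURCE B (Python) =====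
-- def filter_graph_with_type(ins_graph, types, ins_ent_vocab):
--     # Flatten to the kept typed triples, then build every output declaratively:
--     # relation ids come from an ordered dedup of the relation names, rel_dict by
--     # grouping the triple list per relation, schema dedup via dict.fromkeys.
--     triples = [(e1, "__".join([rel, types[e1], types[e2]]), e2)
--                for rel, entries in ins_graph.items()
--                for e1, e2 in entries
--                if e1 in types and e2 in types]
--     rels = list(dict.fromkeys(nr for _, nr, _ in triples))
--     relation_vocab_new = {"PAD": 0, "DUMMY_START_RELATION": 1,
--                           "NO_OP": 2, "UNK": 3}
--     # a typed relation name always contains "__", so it never collides with the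
--     # four reserved names above
--     relation_vocab_new.update((nr, i + 4) for i, nr in enumerate(rels))
--     relation2id = {nr: i for i, nr in enumerate(rels)}
--     rel_dict = {i + 4: [[ins_ent_vocab[e1], ins_ent_vocab[e2]]
--                         for e1, nr2, e2 in triples if nr2 == nr]
--                 for i, nr in enumerate(rels)}
--     sch_graph_new = [list(t) for t in dict.fromkeys(
--         (types[e1], nr, types[e2]) for e1, nr, e2 in triples)]
--     ins_graph_new = [[e1, nr, e2] for e1, nr, e2 in triples]
--     return ins_graph_new, sch_graph_new, relation_vocab_new, rel_dict, relation2id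
-- ===== Notes on version B (the rewrite author's own statement) =====
-- stated objective: alternative
-- what changed: A does everything in one stateful nested loop with two counters and growing dicts; B is counter-free and declarative: it flattens to the kept triple list, takes an ordered dedup of the relation names, derives all three dicts from that deduped list (ids by enumeration, rel_dict by a per-relation grouping scan over the triples) and dedups the schema triples with dict.fromkeys.
import Mathlib
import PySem

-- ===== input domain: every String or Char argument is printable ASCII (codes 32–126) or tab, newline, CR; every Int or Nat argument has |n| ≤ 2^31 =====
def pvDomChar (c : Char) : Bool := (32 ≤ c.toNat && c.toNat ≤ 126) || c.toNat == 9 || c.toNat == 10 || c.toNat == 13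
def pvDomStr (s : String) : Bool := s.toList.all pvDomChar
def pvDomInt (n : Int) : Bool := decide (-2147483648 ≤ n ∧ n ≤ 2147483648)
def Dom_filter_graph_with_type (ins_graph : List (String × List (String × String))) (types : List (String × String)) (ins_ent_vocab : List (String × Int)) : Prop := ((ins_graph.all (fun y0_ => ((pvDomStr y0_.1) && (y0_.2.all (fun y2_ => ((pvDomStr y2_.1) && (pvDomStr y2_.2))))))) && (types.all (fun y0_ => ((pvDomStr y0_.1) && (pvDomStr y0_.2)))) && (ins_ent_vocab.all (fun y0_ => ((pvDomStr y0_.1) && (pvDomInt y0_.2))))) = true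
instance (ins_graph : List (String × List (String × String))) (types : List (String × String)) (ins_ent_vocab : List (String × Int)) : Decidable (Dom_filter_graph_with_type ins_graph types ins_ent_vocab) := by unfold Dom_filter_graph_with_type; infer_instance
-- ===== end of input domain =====

-- B replaces A's single stateful nested loop (two counters, dicts grown per edge) by a declarative
-- construction: flatten to the kept triples, ordered-dedup the relation names, and derive every
-- output from that deduped list (ids by enumeration, rel_dict by per-relation grouping scans,
-- schema dedup via dict.fromkeys); objective: alternative decomposition, not speed.
-- Equivalence is about the RETURN value; neither side mutates its arguments.

-- ===== PORT A =====
-- A's loop state: (ins_graph_new, sch_graph_new, relation_vocab_new, relation2id, rel_dict, counter, counter2)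
def pvStateA : Type := List (List String) × List (List String) × PySem.Dict String Int × PySem.Dict String Int × PySem.Dict Int (List (List Int)) × Int × Int

-- the body of A's inner loop, literally (rel_dict[id].append via Dict.modify = defaultdict access;
-- ins_ent_vocab[e] is ported as getD _ 0 — exact on Pre_, which excludes the KeyError inputs)
def pvStepA (tys : PySem.Dict String String) (voc : PySem.Dict String Int) (rel : String)
    (st : pvStateA) (p : String × String) : pvStateA :=
  match st with
  | (ign, sgn, rv, r2, rd, c, c2) =>
    if (tys.get? p.1).isSome && (tys.get? p.2).isSome then
      let t1 := tys.getD p.1 ""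
      let t2 := tys.getD p.2 ""
      let nr := PySem.Str.join "__" [rel, t1, t2]
      let ign := ign ++ [[p.1, nr, p.2]]
      let (rv, r2, c, c2) :=
        if rv.contains nr then (rv, r2, c, c2)
        else (rv.insert nr c, r2.insert nr c2, c + 1, c2 + 1)
      let rid := rv.getD nr 0
      let rd := rd.modify rid [] (fun l => l ++ [[voc.getD p.1 0, voc.getD p.2 0]])
      let sgn := if [t1, nr, t2] ∈ sgn then sgn else sgn ++ [[t1, nr, t2]]
      (ign, sgn, rv, r2, rd, c, c2)
    else st

def filter_graph_with_type (ins_graph : List (String × List (String × String))) (types : List (String × String)) (ins_ent_vocab : List (String × Int)) : List (List String) × List (List String) × (List (String × Int)) × (List (Int × List (List Int))) × (List (String × Int)) :=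
  let tys : PySem.Dict String String := PySem.Dict.mk types
  let voc : PySem.Dict String Int := PySem.Dict.mk ins_ent_vocab
  let init : pvStateA :=
    ([], [],
     PySem.Dict.mk [("PAD", (0 : Int)), ("DUMMY_START_RELATION", 1), ("NO_OP", 2), ("UNK", 3)],
     PySem.Dict.mk [], PySem.Dict.mk [], (4 : Int), (0 : Int))
  let st := ins_graph.foldl (fun st re => re.2.foldl (pvStepA tys voc re.1) st) init
  (st.1, st.2.1, st.2.2.1.items, st.2.2.2.2.1.items, st.2.2.2.1.items)

-- ===== PORT B =====
def filter_graph_with_type_alt (ins_graph : List (String × List (String × String))) (types : List (String × String)) (ins_ent_vocab : List (String × Int)) : List (List String) × List (List String) × (List (String × Int)) × (List (Int × List (List Int))) × (List (String × Int)) :=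
  let tys : PySem.Dict String String := PySem.Dict.mk types
  let voc : PySem.Dict String Int := PySem.Dict.mk ins_ent_vocab
  -- the kept typed triples (the flattening comprehension)
  let triples : List (String × String × String) := ins_graph.flatMap (fun re =>
    (re.2.filter (fun p => (tys.get? p.1).isSome && (tys.get? p.2).isSome)).map
      (fun p => (p.1, PySem.Str.join "__" [re.1, tys.getD p.1 "", tys.getD p.2 ""], p.2)))
  -- ordered dedup of the relation names (dict.fromkeys)
  let rels : List String := PySem.List.dedup (triples.map (fun t => t.2.1))
  -- a typed relation name always contains "__", so it never collides with the reserved names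
  let relation_vocab_new : PySem.Dict String Int :=
    (PySem.Dict.mk [("PAD", (0 : Int)), ("DUMMY_START_RELATION", 1), ("NO_OP", 2), ("UNK", 3)]).update
      (rels.zipIdx.map (fun q => (q.1, (q.2 : Int) + 4)))
  let relation2id : PySem.Dict String Int :=
    PySem.Dict.ofList (rels.zipIdx.map (fun q => (q.1, (q.2 : Int))))
  let rel_dict : PySem.Dict Int (List (List Int)) :=
    PySem.Dict.ofList (rels.zipIdx.map (fun q =>
      ((q.2 : Int) + 4,
       (triples.filter (fun t => t.2.1 == q.1)).map (fun t => [voc.getD t.1 0, voc.getD t.2.2 0]))))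
  let sch_graph_new : List (List String) :=
    (PySem.List.dedup (triples.map (fun t => (tys.getD t.1 "", t.2.1, tys.getD t.2.2 "")))).map
      (fun q => [q.1, q.2.1, q.2.2])
  let ins_graph_new : List (List String) := triples.map (fun t => [t.1, t.2.1, t.2.2])
  (ins_graph_new, sch_graph_new, relation_vocab_new.items, rel_dict.items, relation2id.items)

-- ===== PRECONDITION & SPEC =====
-- Pre_ excludes exactly the inputs where Python A raises KeyError: a pair whose two entities are both
-- typed (so it is kept) but one of them is missing from ins_ent_vocab.
def Pre_filter_graph_with_type (ins_graph : List (String × List (String × String))) (types : List (String × String)) (ins_ent_vocab : List (String × Int)) : Prop :=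
  ∀ re ∈ ins_graph, ∀ p ∈ re.2,
    ((PySem.Dict.mk types).contains p.1 = true ∧ (PySem.Dict.mk types).contains p.2 = true) →
    ((PySem.Dict.mk ins_ent_vocab).contains p.1 = true ∧ (PySem.Dict.mk ins_ent_vocab).contains p.2 = true)
instance (ins_graph : List (String × List (String × String))) (types : List (String × String)) (ins_ent_vocab : List (String × Int)) : Decidable (Pre_filter_graph_with_type ins_graph types ins_ent_vocab) := by unfold Pre_filter_graph_with_type; infer_instance

def pvWitness_filter_graph_with_type : (List (String × List (String × String))) × (List (String × String)) × (List (String × Int)) :=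
  ([("r", [("x", "y"), ("x", "z")])], [("x", "T"), ("y", "U")], [("x", 1), ("y", 2)])

def Spec_filter_graph_with_type (ins_graph : List (String × List (String × String))) (types : List (String × String)) (ins_ent_vocab : List (String × Int)) (out : List (List String) × List (List String) × (List (String × Int)) × (List (Int × List (List Int))) × (List (String × Int))) : Prop := out = filter_graph_with_type_alt ins_graph types ins_ent_vocab
instance (ins_graph : List (String × List (String × String))) (types : List (String × String)) (ins_ent_vocab : List (String × Int)) (out : List (List String) × List (List String) × (List (String × Int)) × (List (Int × List (List Int))) × (List (String × Int))) : Decidable (Spec_filter_graph_with_type ins_graph types ins_ent_vocab out) := by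
  unfold Spec_filter_graph_with_type
  have h1 : DecidableEq (List (Int × List (List Int))) := inferInstance
  have h2 : DecidableEq (List (String × Int)) := inferInstance
  have h3 : DecidableEq (List (List String)) := inferInstance
  exact @instDecidableEqProd _ _ h3 (@instDecidableEqProd _ _ h3 (@instDecidableEqProd _ _ h2 (@instDecidableEqProd _ _ h1 h2))) _ _

-- ===== CLAIM (what is proved, stated in full; the proofs are below) =====
def Claim_equal_filter_graph_with_type : Prop := ∀ (ins_graph : List (String × List (String × String))) (types : List (String × String)) (ins_ent_vocab : List (String × Int)), Dom_filter_graph_with_type ins_graph types ins_ent_vocab → Pre_filter_graph_with_type ins_graph types ins_ent_vocab → Spec_filter_graph_with_type ins_graph types ins_ent_vocab (filter_graph_with_type ins_graph types ins_ent_vocab)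

-- ===== LEMMAS AND PROOFS =====

-- the kept-pair test, the typed relation name, and the three rendered rows, per triple (rel, e1, e2)
def pvPass (tys : PySem.Dict String String) (x : String × String × String) : Bool :=
  (tys.get? x.2.1).isSome && (tys.get? x.2.2).isSome

def pvNR (tys : PySem.Dict String String) (x : String × String × String) : String :=
  PySem.Str.join "__" [x.1, tys.getD x.2.1 "", tys.getD x.2.2 ""]

def pvMk3 (tys : PySem.Dict String String) (x : String × String × String) : List String :=
  [x.2.1, pvNR tys x, x.2.2]

def pvSch (tys : PySem.Dict String String) (x : String × String × String) : List String :=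
  [tys.getD x.2.1 "", pvNR tys x, tys.getD x.2.2 ""]

def pvPair (voc : PySem.Dict String Int) (x : String × String × String) : List Int :=
  [voc.getD x.2.1 0, voc.getD x.2.2 0]

def pvTriples (ins_graph : List (String × List (String × String))) : List (String × String × String) :=
  ins_graph.flatMap (fun re => re.2.map (fun p => (re.1, p.1, p.2)))

-- the declarative shapes of A's loop state after processing a kept-triple list K
def pvRels (tys : PySem.Dict String String) (K : List (String × String × String)) : List String :=
  PySem.List.dedup (K.map (pvNR tys))

def pvReserved : List (String × Int) :=
  [("PAD", 0), ("DUMMY_START_RELATION", 1), ("NO_OP", 2), ("UNK", 3)]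

def pvRvItems (tys : PySem.Dict String String) (K : List (String × String × String)) : List (String × Int) :=
  pvReserved ++ (pvRels tys K).zipIdx.map (fun q => (q.1, (q.2 : Int) + 4))

def pvR2Items (tys : PySem.Dict String String) (K : List (String × String × String)) : List (String × Int) :=
  (pvRels tys K).zipIdx.map (fun q => (q.1, (q.2 : Int)))

def pvRdItems (tys : PySem.Dict String String) (voc : PySem.Dict String Int) (K : List (String × String × String)) : List (Int × List (List Int)) :=
  (pvRels tys K).zipIdx.map (fun q =>
    ((q.2 : Int) + 4, (K.filter (fun y => pvNR tys y == q.1)).map (pvPair voc)))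

def pvSchList (tys : PySem.Dict String String) (K : List (String × String × String)) : List (List String) :=
  PySem.List.dedup (K.map (pvSch tys))

def pvStateOf (tys : PySem.Dict String String) (voc : PySem.Dict String Int) (K : List (String × String × String)) : pvStateA :=
  (K.map (pvMk3 tys), pvSchList tys K,
   PySem.Dict.mk (pvRvItems tys K), PySem.Dict.mk (pvR2Items tys K),
   PySem.Dict.mk (pvRdItems tys voc K),
   4 + ((pvRels tys K).length : Int), ((pvRels tys K).length : Int))

theorem pvA_flatten (tys : PySem.Dict String String) (voc : PySem.Dict String Int)
    (g : List (String × List (String × String))) (init : pvStateA) :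
    g.foldl (fun st re => re.2.foldl (pvStepA tys voc re.1) st) init
      = (pvTriples g).foldl (fun st x => pvStepA tys voc x.1 st x.2) init := by
  simp [pvTriples, List.foldl_flatMap, List.foldl_map]

theorem pvStepA_skip (tys : PySem.Dict String String) (voc : PySem.Dict String Int)
    (x : String × String × String) (st : pvStateA) (hx : pvPass tys x = false) :
    pvStepA tys voc x.1 st x.2 = st := by
  obtain ⟨a, b, c, d, e, f, g⟩ := st
  have hx' : ((tys.get? x.2.1).isSome && (tys.get? x.2.2).isSome) = false := hx
  simp only [pvStepA, hx', Bool.false_eq_true, if_false]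

theorem pvFoldFilter (tys : PySem.Dict String String) (voc : PySem.Dict String Int)
    (l : List (String × String × String)) (init : pvStateA) :
    l.foldl (fun st x => pvStepA tys voc x.1 st x.2) init
      = (l.filter (pvPass tys)).foldl (fun st x => pvStepA tys voc x.1 st x.2) init := by
  induction l generalizing init with
  | nil => rfl
  | cons x t ih =>
    by_cases hx : pvPass tys x = true
    · simp only [List.foldl_cons, List.filter_cons, hx, if_true]; exact ih _
    · have hx' : pvPass tys x = false := by revert hx; cases pvPass tys x <;> simp
      simp only [List.foldl_cons, List.filter_cons, hx', Bool.false_eq_true, if_false,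
        pvStepA_skip tys voc x init hx']
      exact ih _

-- ordered dedup of a snoc
theorem pv_dedup_snoc {α : Type} [BEq α] [LawfulBEq α] (l : List α) (a : α) :
    PySem.List.dedup (l ++ [a])
      = if a ∈ l then PySem.List.dedup l else PySem.List.dedup l ++ [a] := by
  have h1 : PySem.List.dedup (l ++ [a]) = PySem.Set.add (PySem.List.dedup l) a := by
    simp [PySem.List.dedup, PySem.Set.ofList, List.foldl_append]
  have h2 : (PySem.List.dedup l).contains a = decide (a ∈ l) := by
    have := PySem.Set.mem_ofList l a
    simp only [PySem.List.dedup]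
    rw [List.contains_eq_mem]
    simp [this]
  rw [h1]
  simp only [PySem.Set.add, PySem.Set.contains, h2]
  by_cases hm : a ∈ l <;> simp [hm]

-- dedup commutes with mapping an injective function
theorem pv_dedup_map {α β : Type} [BEq α] [LawfulBEq α] [BEq β] [LawfulBEq β]
    (f : α → β) (hf : Function.Injective f) (l : List α) :
    PySem.List.dedup (l.map f) = (PySem.List.dedup l).map f := by
  induction l using List.reverseRecOn with
  | nil => rfl
  | append_singleton t x ih =>
    rw [List.map_append, List.map_singleton, pv_dedup_snoc, pv_dedup_snoc]
    by_cases hm : x ∈ t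
    · rw [if_pos (List.mem_map_of_mem hm), if_pos hm, ih]
    · have hfm : f x ∉ t.map f := by
        simp only [List.mem_map]
        rintro ⟨y, hy, he⟩
        exact hm (hf he ▸ hy)
      rw [if_neg hfm, if_neg hm, ih, List.map_append, List.map_singleton]

-- a typed relation name contains "__" twice, so it is none of the four reserved names
theorem pv_nr_count (r t1 t2 : String) :
    4 ≤ (PySem.Str.join "__" [r, t1, t2]).toList.count '_' := by
  simp [PySem.Str.join, PySem.Chars.join, List.intercalate, List.count_append]
  omega

theorem pv_nr_not_reserved (r t1 t2 : String) :
    PySem.Str.join "__" [r, t1, t2] ∉ ["PAD", "DUMMY_START_RELATION", "NO_OP", "UNK"] := by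
  intro h
  have hc := pv_nr_count r t1 t2
  simp only [List.mem_cons, List.not_mem_nil, or_false] at h
  rcases h with h | h | h | h <;>
    · rw [h] at hc
      revert hc; decide

theorem pvNR_not_reserved (tys : PySem.Dict String String) (x : String × String × String) :
    pvNR tys x ∉ ["PAD", "DUMMY_START_RELATION", "NO_OP", "UNK"] :=
  pv_nr_not_reserved _ _ _

theorem pvRels_mem_shape (tys : PySem.Dict String String) (K : List (String × String × String))
    (s : String) (hs : s ∈ pvRels tys K) : ∃ y ∈ K, s = pvNR tys y := by
  simp only [pvRels, PySem.List.dedup_eq_ofList, PySem.Set.mem_ofList, List.mem_map] at hs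
  obtain ⟨y, hy, he⟩ := hs
  exact ⟨y, hy, he.symm⟩

theorem pvRels_nodup (tys : PySem.Dict String String) (K : List (String × String × String)) :
    (pvRels tys K).Nodup := by
  simp only [pvRels, PySem.List.dedup_eq_ofList]
  exact PySem.Set.nodup_ofList _

theorem pvRvKeys_nodup (tys : PySem.Dict String String) (K : List (String × String × String)) :
    ((pvRvItems tys K).map Prod.fst).Nodup := by
  have hk : (pvRvItems tys K).map Prod.fst
      = ["PAD", "DUMMY_START_RELATION", "NO_OP", "UNK"] ++ pvRels tys K := by
    simp [pvRvItems, pvReserved, List.map_map]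
    exact List.zipIdx_map_fst 0 _
  rw [hk]
  refine List.Nodup.append (by decide) (pvRels_nodup tys K) ?_
  intro a ha hb
  obtain ⟨y, _, he⟩ := pvRels_mem_shape tys K a hb
  exact pvNR_not_reserved tys y (he ▸ ha)

theorem pvRdKeys_nodup (tys : PySem.Dict String String) (voc : PySem.Dict String Int)
    (K : List (String × String × String)) :
    ((pvRdItems tys voc K).map Prod.fst).Nodup := by
  have hk : (pvRdItems tys voc K).map Prod.fst
      = (pvRels tys K).zipIdx.map (fun q => ((q.2 : Int) + 4)) := by
    simp [pvRdItems, List.map_map, Function.comp]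
  rw [hk,
    show (fun q : String × Nat => ((q.2 : Int) + 4))
        = ((fun n : Nat => (n : Int) + 4) ∘ Prod.snd) from rfl,
    ← List.map_map, List.zipIdx_map_snd]
  refine List.Nodup.map ?_ (List.nodup_range' ..)
  intro a b hab
  simpa using hab

theorem pvRv_contains (tys : PySem.Dict String String) (K : List (String × String × String))
    (x : String × String × String) :
    (PySem.Dict.mk (pvRvItems tys K)).contains (pvNR tys x)
      = decide (pvNR tys x ∈ K.map (pvNR tys)) := by
  have hres := pvNR_not_reserved tys x
  simp only [List.mem_cons, List.not_mem_nil, or_false, not_or] at hres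
  obtain ⟨h1, h2, h3, h4⟩ := hres
  rw [Bool.eq_iff_iff]
  simp only [PySem.Dict.contains_mk, pvRvItems, pvReserved, List.any_append, Bool.or_eq_true,
    List.any_eq_true, beq_iff_eq, decide_eq_true_eq]
  constructor
  · rintro (⟨q, hq, he⟩ | ⟨q, hq, he⟩)
    · simp only [List.mem_cons, List.not_mem_nil, or_false] at hq
      rcases hq with rfl | rfl | rfl | rfl <;> simp_all
    · obtain ⟨p, hp, rfl⟩ := List.mem_map.mp hq
      have hm : p.1 ∈ pvRels tys K :=
        (List.zipIdx_map_fst 0 (pvRels tys K)) ▸ List.mem_map_of_mem hp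
      obtain ⟨y, hy, hey⟩ := pvRels_mem_shape tys K p.1 hm
      rw [← he, hey]
      exact List.mem_map_of_mem hy
  · intro hm
    right
    have hm' : pvNR tys x ∈ pvRels tys K := by
      simp only [pvRels, PySem.List.dedup_eq_ofList, PySem.Set.mem_ofList]
      exact hm
    obtain ⟨i, hi, he⟩ := List.mem_iff_getElem.mp hm'
    refine ⟨(pvNR tys x, (i : Int) + 4), List.mem_map.mpr ⟨(pvNR tys x, i), ?_, rfl⟩, rfl⟩
    rw [List.mk_mem_zipIdx_iff_getElem?]
    simp [he, List.getElem?_eq_getElem hi]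

-- one kept triple advances A's loop state from pvStateOf K to pvStateOf (K ++ [x])
theorem pvStep_state (tys : PySem.Dict String String) (voc : PySem.Dict String Int)
    (K : List (String × String × String)) (x : String × String × String)
    (hx : pvPass tys x = true) :
    pvStepA tys voc x.1 (pvStateOf tys voc K) x.2 = pvStateOf tys voc (K ++ [x]) := by
  obtain ⟨r, e1, e2⟩ := x
  have hx' : ((tys.get? e1).isSome && (tys.get? e2).isSome) = true := hx
  have hcont := pvRv_contains tys K (r, e1, e2)
  simp only [pvNR] at hcont
  have hrelssub : ∀ s, s ∈ pvRels tys K → s ∈ K.map (pvNR tys) := by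
    intro s hs
    simpa [pvRels, PySem.List.dedup_eq_ofList, PySem.Set.mem_ofList] using hs
  simp only [pvStepA, pvStateOf, hx', if_true, hcont]
  have hign : List.map (pvMk3 tys) K ++ [[e1, PySem.Str.join "__" [r, tys.getD e1 "", tys.getD e2 ""], e2]]
      = List.map (pvMk3 tys) (K ++ [(r, e1, e2)]) := by
    simp [pvMk3, pvNR]
  have hsgn : (if [tys.getD e1 "", PySem.Str.join "__" [r, tys.getD e1 "", tys.getD e2 ""], tys.getD e2 ""] ∈ pvSchList tys K
        then pvSchList tys K
        else pvSchList tys K ++ [[tys.getD e1 "", PySem.Str.join "__" [r, tys.getD e1 "", tys.getD e2 ""], tys.getD e2 ""]])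
      = pvSchList tys (K ++ [(r, e1, e2)]) := by
    have hiff : ([tys.getD e1 "", PySem.Str.join "__" [r, tys.getD e1 "", tys.getD e2 ""], tys.getD e2 ""] ∈ pvSchList tys K)
        ↔ ([tys.getD e1 "", PySem.Str.join "__" [r, tys.getD e1 "", tys.getD e2 ""], tys.getD e2 ""] ∈ K.map (pvSch tys)) := by
      simp [pvSchList, PySem.List.dedup_eq_ofList, PySem.Set.mem_ofList]
    rw [show pvSchList tys (K ++ [(r, e1, e2)])
        = PySem.List.dedup (K.map (pvSch tys) ++ [pvSch tys (r, e1, e2)]) by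
      simp [pvSchList]]
    rw [pv_dedup_snoc]
    simp only [pvSch, pvNR]
    by_cases h : [tys.getD e1 "", PySem.Str.join "__" [r, tys.getD e1 "", tys.getD e2 ""], tys.getD e2 ""] ∈ K.map (pvSch tys)
    · rw [if_pos (hiff.mpr h), if_pos (by simpa [pvSch, pvNR] using h), pvSchList]
    · rw [if_neg (fun hc => h (hiff.mp hc)), if_neg (by simpa [pvSch, pvNR] using h), pvSchList]
  by_cases hmem : PySem.Str.join "__" [r, tys.getD e1 "", tys.getD e2 ""] ∈ K.map (pvNR tys)
  · simp only [hmem, decide_true, if_true]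
    have hrels : pvRels tys (K ++ [(r, e1, e2)]) = pvRels tys K := by
      rw [show pvRels tys (K ++ [(r, e1, e2)])
          = PySem.List.dedup (K.map (pvNR tys) ++ [pvNR tys (r, e1, e2)]) by
        simp [pvRels]]
      rw [pv_dedup_snoc]
      simp only [pvNR]
      rw [if_pos hmem, pvRels]
    have hmemr : PySem.Str.join "__" [r, tys.getD e1 "", tys.getD e2 ""] ∈ pvRels tys K := by
      simp only [pvRels, PySem.List.dedup_eq_ofList, PySem.Set.mem_ofList]
      exact hmem
    obtain ⟨i, hi, hieq⟩ := List.mem_iff_getElem.mp hmemr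
    have hzm : (PySem.Str.join "__" [r, tys.getD e1 "", tys.getD e2 ""], i) ∈ (pvRels tys K).zipIdx := by
      rw [List.mk_mem_zipIdx_iff_getElem?]
      simp [List.getElem?_eq_getElem hi, hieq]
    have hrid : ({ items := pvRvItems tys K } : PySem.Dict String Int).getD
        (PySem.Str.join "__" [r, tys.getD e1 "", tys.getD e2 ""]) 0 = (i : Int) + 4 := by
      refine PySem.Dict.getD_of_mem_items _ ?_ ?_ 0
      · exact List.mem_append_right _ (List.mem_map.mpr ⟨_, hzm, rfl⟩)
      · simpa [PySem.Dict.keys] using pvRvKeys_nodup tys K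
    have hgroup : ({ items := pvRdItems tys voc K } : PySem.Dict Int (List (List Int))).getD ((i : Int) + 4) []
        = (K.filter (fun y => pvNR tys y == PySem.Str.join "__" [r, tys.getD e1 "", tys.getD e2 ""])).map (pvPair voc) := by
      refine PySem.Dict.getD_of_mem_items _ ?_ ?_ []
      · exact List.mem_map.mpr ⟨_, hzm, rfl⟩
      · simpa [PySem.Dict.keys] using pvRdKeys_nodup tys voc K
    have hcontrd : ({ items := pvRdItems tys voc K } : PySem.Dict Int (List (List Int))).contains ((i : Int) + 4) = true := by
      rw [PySem.Dict.contains_mk]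
      exact List.any_eq_true.mpr ⟨_, List.mem_map.mpr ⟨_, hzm, rfl⟩, by simp⟩
    have hrd : ({ items := pvRdItems tys voc K } : PySem.Dict Int (List (List Int))).modify
          (({ items := pvRvItems tys K } : PySem.Dict String Int).getD (PySem.Str.join "__" [r, tys.getD e1 "", tys.getD e2 ""]) 0)
          [] (fun l => l ++ [[voc.getD e1 0, voc.getD e2 0]])
        = { items := pvRdItems tys voc (K ++ [(r, e1, e2)]) } := by
      rw [hrid, PySem.Dict.modify, hgroup]
      apply PySem.Dict.ext
      rw [PySem.Dict.items_insert_of_contains _ _ hcontrd]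
      show (pvRdItems tys voc K).map _ = _
      rw [pvRdItems, pvRdItems, hrels, List.map_map]
      apply List.map_congr_left
      rintro ⟨s, j⟩ hq
      have hj := List.mem_zipIdx hq
      simp only [Nat.zero_le, zero_add, Nat.sub_zero, true_and] at hj
      obtain ⟨hjlt, hseq⟩ := hj
      by_cases hji : j = i
      · subst hji
        have hs : s = PySem.Str.join "__" [r, tys.getD e1 "", tys.getD e2 ""] := hseq.trans hieq
        subst hs
        simp only [Function.comp_apply, beq_self_eq_true, if_true, List.filter_append,
          List.map_append, Prod.mk.injEq, true_and]
        simp [pvNR, pvPair]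
      · have hne : ((j : Int) + 4 == (i : Int) + 4) = false := by
          simp only [beq_eq_false_iff_ne, ne_eq]
          intro h
          exact hji (by omega)
        have hsne : s ≠ PySem.Str.join "__" [r, tys.getD e1 "", tys.getD e2 ""] := by
          intro h
          apply hji
          have hjj : (pvRels tys K)[j] = (pvRels tys K)[i] := by
            rw [← hseq, h, hieq]
          exact (List.Nodup.getElem_inj_iff (pvRels_nodup tys K)).mp hjj
        have hxf : (pvNR tys (r, e1, e2) == s) = false := by
          simp only [beq_eq_false_iff_ne, ne_eq, pvNR]
          exact fun h => hsne h.symm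
        simp only [Function.comp_apply, hne, Bool.false_eq_true, if_false, List.filter_append,
          List.map_append, Prod.mk.injEq, true_and]
        rw [List.filter_cons, hxf]
        simp
    have hrv' : pvRvItems tys (K ++ [(r, e1, e2)]) = pvRvItems tys K := by
      rw [pvRvItems, pvRvItems, hrels]
    have hr2' : pvR2Items tys (K ++ [(r, e1, e2)]) = pvR2Items tys K := by
      rw [pvR2Items, pvR2Items, hrels]
    rw [hign, hsgn, hrd, hrv', hr2', hrels]
  · simp only [hmem, decide_false, Bool.false_eq_true, if_false]
    have hcontf : ({ items := pvRvItems tys K } : PySem.Dict String Int).contains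
        (PySem.Str.join "__" [r, tys.getD e1 "", tys.getD e2 ""]) = false := by
      rw [hcont]
      simp [hmem]
    have hrels : pvRels tys (K ++ [(r, e1, e2)])
        = pvRels tys K ++ [PySem.Str.join "__" [r, tys.getD e1 "", tys.getD e2 ""]] := by
      rw [show pvRels tys (K ++ [(r, e1, e2)])
          = PySem.List.dedup (K.map (pvNR tys) ++ [pvNR tys (r, e1, e2)]) by
        simp [pvRels]]
      rw [pv_dedup_snoc]
      simp only [pvNR]
      rw [if_neg hmem, pvRels]
    have hzip : (pvRels tys K ++ [PySem.Str.join "__" [r, tys.getD e1 "", tys.getD e2 ""]]).zipIdx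
        = (pvRels tys K).zipIdx ++ [(PySem.Str.join "__" [r, tys.getD e1 "", tys.getD e2 ""], (pvRels tys K).length)] := by
      rw [List.zipIdx_append]
      simp
    have hrv : ({ items := pvRvItems tys K } : PySem.Dict String Int).insert
          (PySem.Str.join "__" [r, tys.getD e1 "", tys.getD e2 ""]) (4 + ((pvRels tys K).length : Int))
        = { items := pvRvItems tys (K ++ [(r, e1, e2)]) } := by
      apply PySem.Dict.ext
      rw [PySem.Dict.items_insert_of_not_contains _ _ hcontf]
      show pvRvItems tys K ++ _ = _
      rw [pvRvItems, pvRvItems, hrels, hzip, List.map_append]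
      simp [Int.add_comm, List.append_assoc]
    have hcontr2 : ({ items := pvR2Items tys K } : PySem.Dict String Int).contains
        (PySem.Str.join "__" [r, tys.getD e1 "", tys.getD e2 ""]) = false := by
      rw [PySem.Dict.contains_mk]
      apply List.any_eq_false.mpr
      rintro ⟨s, v⟩ hsv
      obtain ⟨⟨s', j⟩, hzm', heq⟩ := List.mem_map.mp hsv
      cases heq
      intro h
      have h' : s' = PySem.Str.join "__" [r, tys.getD e1 "", tys.getD e2 ""] := by simpa using h
      have hsr : s' ∈ pvRels tys K :=
        (List.zipIdx_map_fst 0 (pvRels tys K)) ▸ List.mem_map_of_mem hzm'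
      exact hmem (h' ▸ hrelssub _ hsr)
    have hr2 : ({ items := pvR2Items tys K } : PySem.Dict String Int).insert
          (PySem.Str.join "__" [r, tys.getD e1 "", tys.getD e2 ""]) ((pvRels tys K).length : Int)
        = { items := pvR2Items tys (K ++ [(r, e1, e2)]) } := by
      apply PySem.Dict.ext
      rw [PySem.Dict.items_insert_of_not_contains _ _ hcontr2]
      show pvR2Items tys K ++ _ = _
      rw [pvR2Items, pvR2Items, hrels, hzip, List.map_append]
      simp
    have hrid : (({ items := pvRvItems tys K } : PySem.Dict String Int).insert
          (PySem.Str.join "__" [r, tys.getD e1 "", tys.getD e2 ""]) (4 + ((pvRels tys K).length : Int))).getD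
          (PySem.Str.join "__" [r, tys.getD e1 "", tys.getD e2 ""]) 0
        = 4 + ((pvRels tys K).length : Int) := PySem.Dict.getD_insert_self _ _ _ 0
    have hcontrdf : ({ items := pvRdItems tys voc K } : PySem.Dict Int (List (List Int))).contains
        (4 + ((pvRels tys K).length : Int)) = false := by
      rw [PySem.Dict.contains_mk]
      apply List.any_eq_false.mpr
      rintro ⟨k, v⟩ hkv
      obtain ⟨⟨s', j⟩, hzm', heq⟩ := List.mem_map.mp hkv
      cases heq
      have hj := List.mem_zipIdx hzm'
      simp only [Nat.zero_le, zero_add, Nat.sub_zero, true_and] at hj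
      intro h
      have h' : (j : Int) + 4 = 4 + ((pvRels tys K).length : Int) := by simpa using h
      omega
    have hKnil : K.filter (fun y => pvNR tys y == PySem.Str.join "__" [r, tys.getD e1 "", tys.getD e2 ""]) = [] := by
      apply List.filter_eq_nil_iff.mpr
      intro y hy
      simp only [beq_eq_false_iff_ne, ne_eq, Bool.not_eq_true, beq_eq_false_iff_ne]
      intro h
      exact hmem (h ▸ List.mem_map_of_mem hy)
    have hrd : ({ items := pvRdItems tys voc K } : PySem.Dict Int (List (List Int))).modify
          (4 + ((pvRels tys K).length : Int)) [] (fun l => l ++ [[voc.getD e1 0, voc.getD e2 0]])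
        = { items := pvRdItems tys voc (K ++ [(r, e1, e2)]) } := by
      rw [PySem.Dict.modify, PySem.Dict.getD_of_not_contains _ _ hcontrdf]
      apply PySem.Dict.ext
      rw [PySem.Dict.items_insert_of_not_contains _ _ hcontrdf]
      show pvRdItems tys voc K ++ _ = _
      rw [pvRdItems, pvRdItems, hrels, hzip, List.map_append]
      have hcongr : ∀ q ∈ (pvRels tys K).zipIdx,
          ((fun q : String × Nat => ((q.2 : Int) + 4,
            ((K ++ [(r, e1, e2)]).filter (fun y => pvNR tys y == q.1)).map (pvPair voc))) q)
          = ((fun q : String × Nat => ((q.2 : Int) + 4,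
            (K.filter (fun y => pvNR tys y == q.1)).map (pvPair voc))) q) := by
        rintro ⟨s, j⟩ hq
        have hs : s ∈ pvRels tys K :=
          (List.zipIdx_map_fst 0 (pvRels tys K)) ▸ List.mem_map_of_mem hq
        have hxf : (pvNR tys (r, e1, e2) == s) = false := by
          simp only [beq_eq_false_iff_ne, ne_eq, pvNR]
          intro h
          exact hmem (h ▸ hrelssub _ hs)
        simp [List.filter_append, hxf]
      rw [List.map_congr_left hcongr]
      simp only [List.map_cons, List.map_nil, List.filter_append, hKnil, List.nil_append]
      have hxt : (pvNR tys (r, e1, e2) == PySem.Str.join "__" [r, tys.getD e1 "", tys.getD e2 ""]) = true := by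
        simp [pvNR]
      rw [List.filter_cons, hxt]
      simp [pvPair, Int.add_comm]
    have hc1 : 4 + ((pvRels tys (K ++ [(r, e1, e2)])).length : Int)
        = 4 + ((pvRels tys K).length : Int) + 1 := by
      rw [hrels, List.length_append, List.length_singleton]
      push_cast
      ring
    have hc2 : ((pvRels tys (K ++ [(r, e1, e2)])).length : Int)
        = ((pvRels tys K).length : Int) + 1 := by
      rw [hrels, List.length_append, List.length_singleton]
      push_cast
      ring
    rw [hign, hsgn, hrid, hrd, hrv, hr2, hc1, hc2]

theorem pvFold_state (tys : PySem.Dict String String) (voc : PySem.Dict String Int)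
    (L K : List (String × String × String)) (h : ∀ x ∈ L, pvPass tys x = true) :
    L.foldl (fun st x => pvStepA tys voc x.1 st x.2) (pvStateOf tys voc K)
      = pvStateOf tys voc (K ++ L) := by
  induction L generalizing K with
  | nil => simp
  | cons x t ih =>
    simp only [List.foldl_cons]
    rw [pvStep_state tys voc K x (h x (by simp)),
        ih (K ++ [x]) (fun y hy => h y (by simp [hy]))]
    simp

-- B's flattening comprehension is the filtered triple list, rendered
theorem pvB_flat (tys : PySem.Dict String String) (g : List (String × List (String × String))) :
    (g.flatMap (fun re =>
      (re.2.filter (fun p => (tys.get? p.1).isSome && (tys.get? p.2).isSome)).map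
        (fun p => (p.1, PySem.Str.join "__" [re.1, tys.getD p.1 "", tys.getD p.2 ""], p.2))))
      = ((pvTriples g).filter (pvPass tys)).map
          (fun x => (x.2.1, pvNR tys x, x.2.2)) := by
  induction g with
  | nil => simp [pvTriples]
  | cons re t ih =>
    simp only [pvTriples, List.flatMap_cons, List.filter_append, List.map_append] at *
    rw [ih]
    congr 1
    rw [List.filter_map, List.map_map]
    rfl

theorem pv_ofList_items {κ ν : Type} [BEq κ] [LawfulBEq κ] (ps : List (κ × ν))
    (h : (ps.map Prod.fst).Nodup) : (PySem.Dict.ofList ps).items = ps := by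
  have := PySem.Dict.items_foldl_insert_fresh ps Prod.fst Prod.snd PySem.Dict.empty
    (fun a _ => by simp) h
  simpa [PySem.Dict.ofList, PySem.Dict.update, PySem.Dict.empty] using this

theorem pv_update_reserved_items (rels : List String)
    (h1 : ∀ s ∈ rels, s ∉ ["PAD", "DUMMY_START_RELATION", "NO_OP", "UNK"]) (h2 : rels.Nodup) :
    ((PySem.Dict.mk [("PAD", (0 : Int)), ("DUMMY_START_RELATION", 1), ("NO_OP", 2), ("UNK", 3)]).update
        (rels.zipIdx.map (fun q => (q.1, (q.2 : Int) + 4)))).items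
      = pvReserved ++ rels.zipIdx.map (fun q => (q.1, (q.2 : Int) + 4)) := by
  have hfresh : ∀ a ∈ rels.zipIdx.map (fun q : String × Nat => (q.1, (q.2 : Int) + 4)),
      (PySem.Dict.mk [("PAD", (0 : Int)), ("DUMMY_START_RELATION", 1), ("NO_OP", 2), ("UNK", 3)]).contains a.1 = false := by
    rintro a ha
    obtain ⟨⟨s, j⟩, hzm, rfl⟩ := List.mem_map.mp ha
    have hs : s ∈ rels := (List.zipIdx_map_fst 0 rels) ▸ List.mem_map_of_mem hzm
    have := h1 s hs
    simp only [List.mem_cons, List.not_mem_nil, or_false, not_or] at this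
    obtain ⟨n1, n2, n3, n4⟩ := this
    simp [PySem.Dict.contains_mk, Ne.symm n1, Ne.symm n2, Ne.symm n3, Ne.symm n4]
  have hkeys : ((rels.zipIdx.map (fun q : String × Nat => (q.1, (q.2 : Int) + 4))).map Prod.fst).Nodup := by
    rw [List.map_map, show (Prod.fst ∘ fun q : String × Nat => (q.1, (q.2 : Int) + 4)) = Prod.fst from rfl,
      List.zipIdx_map_fst]
    exact h2
  have := PySem.Dict.items_foldl_insert_fresh
    (rels.zipIdx.map (fun q : String × Nat => (q.1, (q.2 : Int) + 4))) Prod.fst Prod.snd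
    (PySem.Dict.mk [("PAD", (0 : Int)), ("DUMMY_START_RELATION", 1), ("NO_OP", 2), ("UNK", 3)]) hfresh hkeys
  simpa [PySem.Dict.update, pvReserved] using this

theorem pv_list3_injective : Function.Injective (fun q : String × String × String => [q.1, q.2.1, q.2.2]) := by
  rintro ⟨a, b, c⟩ ⟨d, e, f⟩ h
  simp only [List.cons.injEq, and_true] at h
  obtain ⟨h1, h2, h3⟩ := h
  simp [h1, h2, h3]

theorem pv_zipkeys4_nodup {ν : Type} (rels : List String) (v : String × Nat → ν) :
    ((rels.zipIdx.map (fun q => ((q.2 : Int) + 4, v q))).map Prod.fst).Nodup := by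
  rw [List.map_map,
    show (Prod.fst ∘ fun q : String × Nat => ((q.2 : Int) + 4, v q))
        = ((fun n : Nat => (n : Int) + 4) ∘ Prod.snd) from rfl,
    ← List.map_map, List.zipIdx_map_snd]
  refine List.Nodup.map ?_ (List.nodup_range' ..)
  intro a b hab
  simpa using hab

theorem pvL_ins (tys : PySem.Dict String String) (K : List (String × String × String)) :
    List.map (fun t => [t.1, t.2.1, t.2.2]) (K.map (fun x => (x.2.1, pvNR tys x, x.2.2)))
      = K.map (pvMk3 tys) := by
  rw [List.map_map]
  rfl

theorem pvL_rels (tys : PySem.Dict String String) (K : List (String × String × String)) :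
    PySem.List.dedup (List.map (fun t => t.2.1) (K.map (fun x => (x.2.1, pvNR tys x, x.2.2))))
      = pvRels tys K := by
  rw [List.map_map]
  rfl

theorem pvL_sch (tys : PySem.Dict String String) (K : List (String × String × String)) :
    List.map (fun q => [q.1, q.2.1, q.2.2])
        (PySem.List.dedup
          (List.map (fun t => (tys.getD t.1 "", t.2.1, tys.getD t.2.2 ""))
            (K.map (fun x => (x.2.1, pvNR tys x, x.2.2)))))
      = pvSchList tys K := by
  rw [List.map_map, ← pv_dedup_map _ pv_list3_injective, List.map_map]
  rfl

theorem pvL_rv (tys : PySem.Dict String String) (K : List (String × String × String)) :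
    ((PySem.Dict.mk [("PAD", (0 : Int)), ("DUMMY_START_RELATION", 1), ("NO_OP", 2), ("UNK", 3)]).update
        ((pvRels tys K).zipIdx.map (fun q => (q.1, (q.2 : Int) + 4)))).items
      = pvRvItems tys K := by
  rw [pv_update_reserved_items _ ?_ (pvRels_nodup tys K), pvRvItems]
  intro s hs
  obtain ⟨y, _, rfl⟩ := pvRels_mem_shape tys K s hs
  exact pvNR_not_reserved tys y

theorem pvL_r2 (tys : PySem.Dict String String) (K : List (String × String × String)) :
    (PySem.Dict.ofList ((pvRels tys K).zipIdx.map (fun q => (q.1, (q.2 : Int))))).items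
      = pvR2Items tys K := by
  rw [pv_ofList_items]
  · rfl
  · rw [List.map_map,
      show (Prod.fst ∘ fun q : String × Nat => (q.1, (q.2 : Int))) = Prod.fst from rfl,
      List.zipIdx_map_fst]
    exact pvRels_nodup tys K

theorem pvL_rd (tys : PySem.Dict String String) (voc : PySem.Dict String Int)
    (K : List (String × String × String)) :
    (PySem.Dict.ofList ((pvRels tys K).zipIdx.map (fun q =>
        ((q.2 : Int) + 4,
         ((K.map (fun x => (x.2.1, pvNR tys x, x.2.2))).filter (fun t => t.2.1 == q.1)).map
           (fun t => [voc.getD t.1 0, voc.getD t.2.2 0]))))).items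
      = pvRdItems tys voc K := by
  rw [pv_ofList_items _ (pv_zipkeys4_nodup _ _), pvRdItems]
  apply List.map_congr_left
  rintro ⟨s, j⟩ hq
  simp only [List.filter_map, List.map_map]
  rfl

-- ===== VERDICT (by name: the statement is the Claim_ definition above) =====
theorem filter_graph_with_type_spec : Claim_equal_filter_graph_with_type := by
  intro g types voc _ _
  unfold Spec_filter_graph_with_type filter_graph_with_type filter_graph_with_type_alt
  simp only []
  rw [pvA_flatten, pvFoldFilter, pvB_flat]
  have hinit : (([], [],
      ({ items := [("PAD", (0 : Int)), ("DUMMY_START_RELATION", 1), ("NO_OP", 2), ("UNK", 3)] } : PySem.Dict String Int),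
      ({ items := [] } : PySem.Dict String Int),
      ({ items := [] } : PySem.Dict Int (List (List Int))), (4 : Int), (0 : Int)) : pvStateA)
      = pvStateOf (PySem.Dict.mk types) (PySem.Dict.mk voc) [] := rfl
  rw [hinit,
    pvFold_state (PySem.Dict.mk types) (PySem.Dict.mk voc) _ [] (fun x hx => List.of_mem_filter hx),
    List.nil_append]
  rw [pvL_rels, pvL_ins, pvL_sch, pvL_rv, pvL_r2, pvL_rd]
  rfl
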